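-- pv_equiv track=rewrite | github.com/feltroidprime/zk-ecip-py | src/utils.py | neg_3_base_le
-- ===== SOURCE A (Python) =====
-- def neg_3_base_le(scalar):
--     """
--     Decomposes a scalar into base -3 representation.
--     :param scalar: The integer to be decomposed.
--     :return: A list of coefficients in base -3 representation. (Least significant bit first),
--     with digits [-1, 0, 1]
--     """
--     if scalar == 0:
--         return [0]
--
--     digits = []
--     while scalar != 0:
--         remainder = scalar % 3
--         if (
--             remainder == 2
--         ):  # if the remainder is 2, we set it to -1 and add 1 to the next digit
--             remainder = -1
--             scalar += 1
--         # For remainder 1 and 0, no change is required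
--         digits.append(remainder)
--         scalar = -(scalar // 3)  # divide by -3 for the next digit
--
--     return digits
-- ===== SOURCE B (Python) =====
-- def neg_3_base_le(scalar):
--     """Base -3 decomposition via branchless balanced ternary + odd-index sign flip."""
--     if scalar == 0:
--         return [0]
--     digits = []
--     n = scalar
--     while n:
--         r = (n + 1) % 3 - 1
--         digits.append(r)
--         n = (n - r) // 3
--     return [-d if i % 2 else d for i, d in enumerate(digits)]
-- ===== Notes on version B (the rewrite author's own statement) =====
-- stated objective: alternative
-- what changed: B stages the work into two passes: a branchless balanced-ternary loop (r = (n+1)%3 - 1; n = (n-r)//3, positive division, no carry branch) followed by a sign-flip of every odd-indexed digit to convert weights 3^i into (-3)^i, instead of A's single loop with a remainder-2 carry branch and a negated quotient each step.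
import Mathlib
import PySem

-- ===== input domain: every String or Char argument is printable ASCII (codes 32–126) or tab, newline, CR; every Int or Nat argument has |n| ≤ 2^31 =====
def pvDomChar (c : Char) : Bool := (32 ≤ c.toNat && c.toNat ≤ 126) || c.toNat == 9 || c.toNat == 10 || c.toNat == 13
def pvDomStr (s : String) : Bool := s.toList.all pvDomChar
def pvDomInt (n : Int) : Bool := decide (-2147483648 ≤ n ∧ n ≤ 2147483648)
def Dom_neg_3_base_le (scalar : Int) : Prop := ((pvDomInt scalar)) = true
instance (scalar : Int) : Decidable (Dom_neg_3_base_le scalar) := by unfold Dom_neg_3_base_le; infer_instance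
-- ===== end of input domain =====

-- B replaces A's carry-branch/negated-quotient loop by a branchless balanced-ternary pass
-- plus an odd-index sign-flip pass; objective: alternative (same asymptotic cost).

-- termination helpers (cited by decreasing_by)
lemma pv_dec_plus (n : Int) (h0 : ¬ n = 0) (h2 : PySem.Int.mod n 3 = 2) :
    (PySem.Int.floordiv (n + 1) 3).natAbs < n.natAbs := by
  rw [PySem.Int.floordiv_eq_ediv_of_pos (by omega)] at *
  rw [PySem.Int.mod_eq_emod_of_pos (by omega)] at h2
  omega

lemma pv_dec_same (n : Int) (h0 : ¬ n = 0) (h2 : ¬ PySem.Int.mod n 3 = 2) :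
    (PySem.Int.floordiv n 3).natAbs < n.natAbs := by
  rw [PySem.Int.floordiv_eq_ediv_of_pos (by omega)] at *
  rw [PySem.Int.mod_eq_emod_of_pos (by omega)] at h2
  omega

lemma pv_dec_bt (n : Int) (h0 : ¬ n = 0) :
    (PySem.Int.floordiv (n - (PySem.Int.mod (n + 1) 3 - 1)) 3).natAbs < n.natAbs := by
  rw [PySem.Int.floordiv_eq_ediv_of_pos (by omega),
      PySem.Int.mod_eq_emod_of_pos (by omega)]
  omega

-- ===== PORT A =====
-- A's while loop: remainder = scalar % 3; 2 ↦ -1 with carry; scalar = -(scalar // 3)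
def pvLoopA (s : Int) : List Int :=
  if h0 : s = 0 then []
  else if h2 : PySem.Int.mod s 3 = 2 then
    (-1) :: pvLoopA (-(PySem.Int.floordiv (s + 1) 3))
  else
    PySem.Int.mod s 3 :: pvLoopA (-(PySem.Int.floordiv s 3))
termination_by s.natAbs
decreasing_by
  · simpa using pv_dec_plus s h0 h2
  · simpa using pv_dec_same s h0 h2

def neg_3_base_le (scalar : Int) : List Int :=
  if scalar = 0 then [0] else pvLoopA scalar

-- ===== PORT B =====
-- B's while loop: branchless balanced ternary, r = (n+1)%3 - 1; n = (n-r)//3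
def pvLoopB (n : Int) : List Int :=
  if h0 : n = 0 then []
  else
    let r := PySem.Int.mod (n + 1) 3 - 1
    r :: pvLoopB (PySem.Int.floordiv (n - r) 3)
termination_by n.natAbs
decreasing_by exact pv_dec_bt n h0

def neg_3_base_le_alt (scalar : Int) : List Int :=
  if scalar = 0 then [0]
  else (PySem.List.enumerate (pvLoopB scalar) 0).map
    (fun p => if PySem.Int.mod p.1 2 ≠ 0 then -p.2 else p.2)

-- ===== PRECONDITION & SPEC =====
def Spec_neg_3_base_le (scalar : Int) (out : List Int) : Prop := out = neg_3_base_le_alt scalar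
instance (scalar : Int) (out : List Int) : Decidable (Spec_neg_3_base_le scalar out) := by unfold Spec_neg_3_base_le; infer_instance

-- ===== CLAIM (what is proved, stated in full; the proofs are below) =====
def Claim_equal_neg_3_base_le : Prop := ∀ (scalar : Int), Dom_neg_3_base_le scalar → Spec_neg_3_base_le scalar (neg_3_base_le scalar)

-- ===== LEMMAS AND PROOFS =====

-- negate the digits at odd positions (flipO: position 0 is even; flipE: position 0 is odd)
mutual
def flipO : List Int → List Int
  | [] => []
  | x :: xs => x :: flipE xs
def flipE : List Int → List Int
  | [] => []
  | x :: xs => (-x) :: flipO xs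
end

lemma flip_enum (l : List Int) : ∀ (s : Int), 0 ≤ s →
    ((s % 2 = 0 → (PySem.List.enumerate l s).map
        (fun p => if PySem.Int.mod p.1 2 ≠ 0 then -p.2 else p.2) = flipO l) ∧
     (s % 2 = 1 → (PySem.List.enumerate l s).map
        (fun p => if PySem.Int.mod p.1 2 ≠ 0 then -p.2 else p.2) = flipE l)) := by
  induction l with
  | nil => intro s _; simp [PySem.List.enumerate_nil, flipO, flipE]
  | cons x xs ih =>
    intro s hs
    have hmod : PySem.Int.mod s 2 = s % 2 := PySem.Int.mod_eq_emod_of_pos (by omega)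
    constructor
    · intro h0
      have hc : ¬ (PySem.Int.mod s 2 ≠ 0) := by rw [hmod, h0]; simp
      simp only [PySem.List.enumerate_cons, List.map_cons, flipO, if_neg hc]
      exact congrArg _ ((ih (s + 1) (by omega)).2 (by omega))
    · intro h1
      have hc : PySem.Int.mod s 2 ≠ 0 := by rw [hmod, h1]; simp
      simp only [PySem.List.enumerate_cons, List.map_cons, flipE, if_pos hc]
      exact congrArg _ ((ih (s + 1) (by omega)).1 (by omega))

lemma pv_main : ∀ (k : Nat) (n : Int), n.natAbs = k →
    (pvLoopA n = flipO (pvLoopB n) ∧ pvLoopA (-n) = flipE (pvLoopB n)) := by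
  intro k
  induction k using Nat.strong_induction_on with
  | _ k ih =>
    intro n hk
    by_cases h0 : n = 0
    · subst h0; rw [pvLoopA, pvLoopB]; simp [flipO, flipE, pvLoopA]
    have hm : PySem.Int.mod n 3 = n % 3 := PySem.Int.mod_eq_emod_of_pos (by omega)
    have hmn : PySem.Int.mod (-n) 3 = (-n) % 3 := PySem.Int.mod_eq_emod_of_pos (by omega)
    have hm1 : PySem.Int.mod (n + 1) 3 = (n + 1) % 3 := PySem.Int.mod_eq_emod_of_pos (by omega)
    have hf : ∀ a : Int, PySem.Int.floordiv a 3 = a / 3 :=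
      fun a => PySem.Int.floordiv_eq_ediv_of_pos (by omega)
    have h3 : n % 3 = 0 ∨ n % 3 = 1 ∨ n % 3 = 2 := by omega
    rcases h3 with he | he | he
    · -- digit 0 on both sides
      have hA : pvLoopA n = 0 :: pvLoopA (-(n / 3)) := by
        rw [pvLoopA]; simp [h0, hm, hf, he]
      have hAn : pvLoopA (-n) = 0 :: pvLoopA (n / 3) := by
        rw [pvLoopA]
        have : -n % 3 = 0 := by omega
        have harg : -(-n / 3) = n / 3 := by omega
        simp [h0, hmn, hf, this, harg]
      have hB : pvLoopB n = 0 :: pvLoopB (n / 3) := by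
        rw [pvLoopB]
        have h1 : (n + 1) % 3 = 1 := by omega
        have harg : (n - ((n + 1) % 3 - 1)) / 3 = n / 3 := by omega
        simp [h0, hm1, hf, h1, harg]
      have hlt : (n / 3).natAbs < k := by omega
      have ihq := ih _ hlt (n / 3) rfl
      refine ⟨?_, ?_⟩
      · rw [hA, hB, flipO]; exact congrArg _ ihq.2
      · rw [hAn, hB, flipE]; simpa using congrArg (List.cons (0:Int)) ihq.1
    · -- n % 3 = 1 : digit 1 on both sides
      have hA : pvLoopA n = 1 :: pvLoopA (-(n / 3)) := by
        rw [pvLoopA]; simp [h0, hm, hf, he]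
      have hAn : pvLoopA (-n) = (-1) :: pvLoopA (n / 3) := by
        rw [pvLoopA]
        have : -n % 3 = 2 := by omega
        have harg : -((-n + 1) / 3) = n / 3 := by omega
        simp [h0, hmn, hf, this, harg]
      have hB : pvLoopB n = 1 :: pvLoopB (n / 3) := by
        rw [pvLoopB]
        have h1 : (n + 1) % 3 = 2 := by omega
        simp [h0, hm1, hf, h1]
        congr 1
        omega
      have hlt : (n / 3).natAbs < k := by omega
      have ihq := ih _ hlt (n / 3) rfl
      refine ⟨?_, ?_⟩
      · rw [hA, hB, flipO]; exact congrArg _ ihq.2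
      · rw [hAn, hB, flipE]; simpa using congrArg (List.cons (-1:Int)) ihq.1
    · -- n % 3 = 2 : digit -1 on both sides
      have hA : pvLoopA n = (-1) :: pvLoopA (-((n + 1) / 3)) := by
        rw [pvLoopA]; simp [h0, hm, hf, he]
      have hAn : pvLoopA (-n) = 1 :: pvLoopA ((n + 1) / 3) := by
        rw [pvLoopA]
        have : -n % 3 = 1 := by omega
        have harg : -(-n / 3) = (n + 1) / 3 := by omega
        simp [h0, hmn, hf, this, harg]
      have hB : pvLoopB n = (-1) :: pvLoopB ((n + 1) / 3) := by
        rw [pvLoopB]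
        have h1 : (n + 1) % 3 = 0 := by omega
        simp [h0, hm1, hf, h1]
      have hlt : ((n + 1) / 3).natAbs < k := by omega
      have ihq := ih _ hlt ((n + 1) / 3) rfl
      refine ⟨?_, ?_⟩
      · rw [hA, hB, flipO]; exact congrArg _ ihq.2
      · rw [hAn, hB, flipE]; simpa using congrArg (List.cons (1:Int)) ihq.1

-- ===== VERDICT (by name: the statement is the Claim_ definition above) =====
theorem neg_3_base_le_spec : Claim_equal_neg_3_base_le := by
  intro scalar _
  unfold Spec_neg_3_base_le neg_3_base_le neg_3_base_le_alt
  by_cases h : scalar = 0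
  · simp [h]
  · rw [if_neg h, if_neg h, (flip_enum (pvLoopB scalar) 0 (by omega)).1 (by omega)]
    exact (pv_main scalar.natAbs scalar rfl).1
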